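-- pv_equiv track=rewrite | github.com/Leao-marinho/FPRO_MIEIC | days_until_empty.py | days_until_empty
-- ===== SOURCE A (Python) =====
-- def days_until_empty(C, l):
--     capacity = C
--     i = 0
--     while(capacity > 0):
--         i = i + 1
--         capacity = capacity + l
--         if(capacity >= C):
--             capacity = C
--             capacity = capacity - i
--         else:
--             capacity = capacity - i
--
--     return i
-- ===== SOURCE B (Python) =====
-- def days_until_empty(C, l):
--     # Closed-form phase analysis + binary search on the day index (O(log C) vs A's O(days)).
--     if C <= 0:
--         return 0
--     if l >= 0:
--         if C <= l + 1:
--             # tank stays topped up to full each day: capacity after day i is C - i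
--             return C
--         # after day l+1 capacity is C-(l+1); k days later it is C-(l+1)-k*(k+3)//2
--         def empty(k):
--             return k * (k + 3) >= 2 * (C - l - 1)
--         lo, hi = 1, C
--         while lo < hi:
--             mid = (lo + hi) // 2
--             if empty(mid):
--                 hi = mid
--             else:
--                 lo = mid + 1
--         return l + 1 + lo
--     else:
--         # never clamps: capacity after day i is C + i*l - i*(i+1)//2
--         def empty(i):
--             return i * (i + 1) - 2 * i * l >= 2 * C
--         lo, hi = 1, C
--         while lo < hi:
--             mid = (lo + hi) // 2
--             if empty(mid):
--                 hi = mid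
--             else:
--                 lo = mid + 1
--         return lo
-- ===== Notes on version B (the rewrite author's own statement) =====
-- stated objective: faster
-- what changed: Replaces the day-by-day simulation with a closed-form phase analysis (saturated phase gives capacity C-i; afterwards an explicit quadratic formula) and a binary search for the first day the quadratic drops to zero.
import Mathlib
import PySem

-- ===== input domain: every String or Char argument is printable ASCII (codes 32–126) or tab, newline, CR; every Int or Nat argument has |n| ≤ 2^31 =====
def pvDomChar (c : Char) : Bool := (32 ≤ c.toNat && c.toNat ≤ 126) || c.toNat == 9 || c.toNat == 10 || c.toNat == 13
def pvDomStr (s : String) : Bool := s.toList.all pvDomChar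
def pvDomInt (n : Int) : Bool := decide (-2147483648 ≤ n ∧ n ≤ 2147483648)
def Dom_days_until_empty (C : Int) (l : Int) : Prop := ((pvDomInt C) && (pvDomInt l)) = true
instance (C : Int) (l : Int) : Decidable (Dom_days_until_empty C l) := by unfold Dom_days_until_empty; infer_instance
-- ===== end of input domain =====

-- B replaces A's day-by-day simulation by a closed-form phase analysis plus a binary
-- search for the first empty day (asymptotically faster; measured).


-- ===== PORT A =====
-- A's while-loop; the fuel `C.toNat + 1` is a termination guard only (the loop runs at
-- most C iterations, proved below), never reached before the guard `capacity > 0` fails.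
def aloop (C l : Int) : Int → Int → Nat → Int
  | _, i, 0 => i
  | cap, i, fuel+1 =>
    if cap > 0 then
      let i' := i + 1
      let c1 := cap + l
      let c2 := if c1 ≥ C then C - i' else c1 - i'
      aloop C l c2 i' fuel
    else i

def days_until_empty (C : Int) (l : Int) : Int := aloop C l C 0 (C.toNat + 1)

-- ===== PORT B =====
-- binary search: first i in [lo, hi] with P i (P monotone, P hi true)
def bloop (P : Int → Bool) (lo hi : Int) : Int :=
  if h : lo < hi then
    if P (PySem.Int.floordiv (lo + hi) 2) then bloop P lo (PySem.Int.floordiv (lo + hi) 2)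
    else bloop P (PySem.Int.floordiv (lo + hi) 2 + 1) hi
  else lo
termination_by (hi - lo).toNat
decreasing_by
  · rw [PySem.Int.floordiv_eq_ediv_of_pos (by norm_num : (0:Int) < 2)]
    omega
  · rw [PySem.Int.floordiv_eq_ediv_of_pos (by norm_num : (0:Int) < 2)]
    omega

def days_until_empty_alt (C : Int) (l : Int) : Int :=
  if C ≤ 0 then 0
  else if l ≥ 0 then
    if C ≤ l + 1 then C
    else l + 1 + bloop (fun k => k * (k + 3) ≥ 2 * (C - l - 1)) 1 C
  else
    bloop (fun i => i * (i + 1) - 2 * i * l ≥ 2 * C) 1 C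

-- ===== PRECONDITION & SPEC =====
def Spec_days_until_empty (C : Int) (l : Int) (out : Int) : Prop := out = days_until_empty_alt C l
instance (C : Int) (l : Int) (out : Int) : Decidable (Spec_days_until_empty C l out) := by unfold Spec_days_until_empty; infer_instance

-- ===== CLAIM (what is proved, stated in full; the proofs are below) =====
def Claim_equal_days_until_empty : Prop := ∀ (C : Int) (l : Int), Dom_days_until_empty C l → Spec_days_until_empty C l (days_until_empty C l)

-- ===== LEMMAS AND PROOFS =====

-- the capacity after day n of A's simulation, as a recurrence
def capf (C l : Int) : Nat → Int
  | 0 => C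
  | n+1 =>
    let c1 := capf C l n + l
    (if c1 ≥ C then C else c1) - (n + 1)

lemma capf_le (C l : Int) (n : Nat) : capf C l (n + 1) ≤ C - (n + 1) := by
  simp only [capf]
  split <;> omega

-- A's loop returns m whenever capf hits ≤ 0 first at m
lemma aloop_run (C l : Int) (m : Nat) (hm : capf C l m ≤ 0)
    (hlt : ∀ j, j < m → 0 < capf C l j) :
    ∀ fuel n, n ≤ m → m ≤ n + fuel → aloop C l (capf C l n) n fuel = (m : Int) := by
  intro fuel
  induction fuel with
  | zero =>
    intro n h1 h2
    have : n = m := by omega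
    simp [aloop, this]
  | succ f ih =>
    intro n h1 h2
    by_cases hnm : n = m
    · subst hnm
      simp only [aloop]
      rw [if_neg (by omega)]
    · have hn : n < m := by omega
      have hpos : 0 < capf C l n := hlt n hn
      simp only [aloop]
      rw [if_pos (by omega)]
      have hstep : (if capf C l n + l ≥ C then C - ((n : Int) + 1) else capf C l n + l - ((n : Int) + 1))
          = capf C l (n + 1) := by
        simp only [capf]
        split <;> (push_cast; ring)
      have := ih (n + 1) (by omega) (by omega)
      push_cast at this
      rw [hstep]
      exact this

-- the closed form of capf used by B
lemma capf_closed (C l : Int) (n : Nat) :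
    capf C l n =
      if 0 ≤ l then
        (if (n : Int) ≤ l + 1 then C - n
         else C - (l + 1) - (((n : Int) - l - 1) * ((n : Int) - l + 2)) / 2)
      else C + n * l - ((n : Int) * ((n : Int) + 1)) / 2 := by
  induction n with
  | zero =>
    by_cases hl : 0 ≤ l
    · simp [capf, hl]; omega
    · simp [capf, hl]
  | succ n ih =>
    by_cases hl : 0 ≤ l
    · by_cases hcase : ((n : Int) + 1) ≤ l + 1
      · -- saturated phase: clamp fires
        have hn : (n : Int) ≤ l + 1 := by omega
        simp only [capf, ih, if_pos hl, if_pos hn]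
        rw [if_pos (by omega)]
        push_cast
        rw [if_pos (by omega)]
      · push_cast
        rw [if_pos hl, if_neg (by omega)]
        by_cases hb : (n : Int) ≤ l + 1
        · -- boundary day: (n : Int) = l + 1
          have hnl : (n : Int) = l + 1 := by omega
          simp only [capf, ih, if_pos hl, if_pos hb]
          rw [if_neg (by omega)]
          rw [show ((n : Int) + 1 - l - 1) * ((n : Int) + 1 - l + 2) = 1 * 4 from by rw [hnl]; ring]
          norm_num
          omega
        · -- quadratic tail
          have hk1 : 1 ≤ (n : Int) - l - 1 := by omega
          simp only [capf, ih, if_pos hl, if_neg hb]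
          have hdiv_nonneg : 0 ≤ ((n : Int) - l - 1) * ((n : Int) - l + 2) / 2 :=
            Int.ediv_nonneg (by nlinarith) (by norm_num)
          rw [if_neg (by omega)]
          rw [show ((n : Int) + 1 - l - 1) * ((n : Int) + 1 - l + 2)
              = ((n : Int) - l - 1) * ((n : Int) - l + 2) + ((n : Int) - l + 1) * 2 from by ring]
          rw [Int.add_mul_ediv_right _ _ (by norm_num : (2:Int) ≠ 0)]
          ring
    · -- l < 0: never clamps
      push_cast
      rw [if_neg hl]
      simp only [capf, ih, if_neg hl]
      have hdiv_nonneg : 0 ≤ (n : Int) * ((n : Int) + 1) / 2 :=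
        Int.ediv_nonneg (by positivity) (by norm_num)
      have hcl : ¬ (C + (n : Int) * l - (n : Int) * ((n : Int) + 1) / 2 + l ≥ C) := by
        have h1 : ((n : Int) + 1) * l ≤ l := by nlinarith
        have h2 : (n : Int) * l + l ≤ l := by nlinarith
        omega
      rw [if_neg hcl]
      rw [show ((n : Int) + 1) * ((n : Int) + 1 + 1) = (n : Int) * ((n : Int) + 1) + ((n : Int) + 1) * 2
          from by ring]
      rw [Int.add_mul_ediv_right _ _ (by norm_num : (2:Int) ≠ 0)]
      ring

-- monotone P over [1, ∞)
lemma mono_chain (P : Int → Bool) (mono : ∀ i, 1 ≤ i → P i = true → P (i + 1) = true) :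
    ∀ i j : Int, 1 ≤ i → i ≤ j → P i = true → P j = true := by
  intro i j hi hij hPi
  induction j, hij using Int.le_induction with
  | base => exact hPi
  | succ j hj ih => exact mono j (by omega) ih

-- binary-search correctness: bloop returns the least index in [lo, hi] satisfying P
lemma bloop_spec (P : Int → Bool) (mono : ∀ i, 1 ≤ i → P i = true → P (i + 1) = true) :
    ∀ lo hi : Int, 1 ≤ lo → lo ≤ hi → P hi = true →
      (∀ j, 1 ≤ j → j < lo → P j = false) →
      1 ≤ bloop P lo hi ∧ bloop P lo hi ≤ hi ∧ P (bloop P lo hi) = true ∧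
        (∀ j, 1 ≤ j → j < bloop P lo hi → P j = false) := by
  intro lo hi
  induction lo, hi using bloop.induct P with
  | case1 lo hi h hP ih =>
    intro h1 hlh hhi hbelow
    have hfd : PySem.Int.floordiv (lo + hi) 2 = (lo + hi) / 2 :=
      PySem.Int.floordiv_eq_ediv_of_pos (by norm_num)
    rw [hfd] at hP ih
    rw [bloop, dif_pos h, hfd, if_pos hP]
    obtain ⟨a, b, c, d⟩ := ih h1 (by omega) hP hbelow
    exact ⟨a, by omega, c, d⟩
  | case2 lo hi h hP ih =>
    intro h1 hlh hhi hbelow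
    have hfd : PySem.Int.floordiv (lo + hi) 2 = (lo + hi) / 2 :=
      PySem.Int.floordiv_eq_ediv_of_pos (by norm_num)
    rw [hfd] at hP ih
    rw [bloop, dif_pos h, hfd, if_neg hP]
    refine ih (by omega) (by omega) hhi ?_
    intro j hj hjlt
    by_cases hjlo : j < lo
    · exact hbelow j hj hjlo
    · by_contra hPj
      have hPj' : P j = true := by
        cases hPj'' : P j with
        | true => rfl
        | false => exact absurd hPj'' hPj
      have hPm : P ((lo + hi) / 2) = true :=
        mono_chain P mono j _ hj (by omega) hPj'
      simp [hPm] at hP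
  | case3 lo hi h =>
    intro h1 hlh hhi hbelow
    have hle : lo = hi := by omega
    rw [bloop, dif_neg h]
    exact ⟨h1, by omega, by rw [hle]; exact hhi, hbelow⟩

-- A equals any m that is the first day capf drops to ≤ 0
lemma A_eq (C l : Int) (m : Nat) (hm : capf C l m ≤ 0)
    (hlt : ∀ j, j < m → 0 < capf C l j) : days_until_empty C l = (m : Int) := by
  have hfuel : m ≤ C.toNat + 1 := by
    by_contra hcon
    have h1 : C.toNat + 1 < m := by omega
    have h2 := hlt (C.toNat + 1) h1
    have h3 := capf_le C l C.toNat
    omega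
  have h0 : capf C l 0 = C := rfl
  have := aloop_run C l m hm hlt (C.toNat + 1) 0 (by omega) (by omega)
  simpa [days_until_empty, h0] using this

theorem days_until_empty_spec_aux (C l : Int) :
    days_until_empty C l = days_until_empty_alt C l := by
  by_cases hC : C ≤ 0
  · -- loop never entered
    rw [days_until_empty_alt, if_pos hC]
    have : days_until_empty C l = ((0 : Nat) : Int) :=
      A_eq C l 0 (by simpa [capf] using hC) (by omega)
    simpa using this
  · rw [not_le] at hC
    by_cases hl : 0 ≤ l
    · by_cases hCl : C ≤ l + 1
      · -- fully saturated: answer is C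
        rw [days_until_empty_alt, if_neg (by omega), if_pos hl, if_pos hCl]
        have hCt : ((C.toNat : Int)) = C := Int.toNat_of_nonneg (by omega)
        have hm : capf C l C.toNat ≤ 0 := by
          rw [capf_closed, if_pos hl, if_pos (by omega)]
          omega
        have hlt : ∀ j, j < C.toNat → 0 < capf C l j := by
          intro j hj
          rw [capf_closed, if_pos hl, if_pos (by omega)]
          omega
        rw [A_eq C l C.toNat hm hlt, hCt]
      · -- saturated phase of length l+1, then binary search over the quadratic tail
        rw [not_le] at hCl
        rw [days_until_empty_alt, if_neg (by omega), if_pos hl, if_neg (by omega)]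
        set P : Int → Bool := fun k => decide (k * (k + 3) ≥ 2 * (C - l - 1)) with hP
        have mono : ∀ i, 1 ≤ i → P i = true → P (i + 1) = true := by
          intro i hi hPi
          simp only [hP, decide_eq_true_eq] at hPi ⊢
          nlinarith
        have hhi : P C = true := by
          simp only [hP, decide_eq_true_eq]
          nlinarith
        obtain ⟨hr1, hr2, hr3, hr4⟩ :=
          bloop_spec P mono 1 C (le_refl _) (by omega) hhi (by intro j hj hjl; omega)
        set r : Int := bloop P 1 C with hr
        set m : Nat := (l + 1 + r).toNat with hmdef
        have hmi : ((m : Int)) = l + 1 + r := Int.toNat_of_nonneg (by omega)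
        simp only [hP, decide_eq_true_eq] at hr3
        have hm : capf C l m ≤ 0 := by
          rw [capf_closed, if_pos hl, if_neg (by omega)]
          rw [show ((m : Int) - l - 1) * ((m : Int) - l + 2) = r * (r + 3) from by rw [hmi]; ring]
          omega
        have hlt : ∀ j, j < m → 0 < capf C l j := by
          intro j hj
          rw [capf_closed, if_pos hl]
          by_cases hjs : (j : Int) ≤ l + 1
          · rw [if_pos hjs]; omega
          · rw [if_neg hjs]
            have hk1 : 1 ≤ (j : Int) - l - 1 := by omega
            have hkr : (j : Int) - l - 1 < r := by omega
            have hj4 := hr4 ((j : Int) - l - 1) hk1 hkr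
            simp only [hP, decide_eq_false_iff_not, not_le] at hj4
            rw [show ((j : Int) - l - 1) * ((j : Int) - l + 2)
                = ((j : Int) - l - 1) * ((j : Int) - l - 1 + 3) from by ring]
            omega
        rw [A_eq C l m hm hlt, hmi]
    · -- l < 0: pure quadratic from day one
      rw [not_le] at hl
      rw [days_until_empty_alt, if_neg (by omega), if_neg (by omega)]
      set P : Int → Bool := fun i => decide (i * (i + 1) - 2 * i * l ≥ 2 * C) with hP
      have mono : ∀ i, 1 ≤ i → P i = true → P (i + 1) = true := by
        intro i hi hPi
        simp only [hP, decide_eq_true_eq] at hPi ⊢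
        nlinarith
      have hhi : P C = true := by
        simp only [hP, decide_eq_true_eq]
        nlinarith
      obtain ⟨hr1, hr2, hr3, hr4⟩ :=
        bloop_spec P mono 1 C (le_refl _) (by omega) hhi (by intro j hj hjl; omega)
      set r : Int := bloop P 1 C with hr
      set m : Nat := r.toNat with hmdef
      have hmi : ((m : Int)) = r := Int.toNat_of_nonneg (by omega)
      simp only [hP, decide_eq_true_eq] at hr3
      have hbridge : 2 * r * l = 2 * (r * l) := by ring
      have hm : capf C l m ≤ 0 := by
        rw [capf_closed, if_neg (by omega), hmi]
        omega
      have hlt : ∀ j, j < m → 0 < capf C l j := by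
        intro j hj
        rw [capf_closed, if_neg (by omega)]
        by_cases hj0 : j = 0
        · subst hj0; simp; omega
        · have hj1 : 1 ≤ (j : Int) := by omega
          have hj4 := hr4 (j : Int) hj1 (by omega)
          simp only [hP, decide_eq_false_iff_not, not_le] at hj4
          have hbj : 2 * (j : Int) * l = 2 * ((j : Int) * l) := by ring
          omega
      rw [A_eq C l m hm hlt, hmi]

-- ===== VERDICT (by name: the statement is the Claim_ definition above) =====
theorem days_until_empty_spec : Claim_equal_days_until_empty := by
  intro C l _
  exact days_until_empty_spec_aux C l
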